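-- pv_equiv track=rewrite | github.com/DarKoul-Wmg/AMS-AWS-1 | MP03 Programación/UF2_Python dineño modular/Python (UF2)/operarStrings.py | sort_vowels_consonants
-- ===== SOURCE A (Python) =====
-- def sort_vowels_consonants(s):
--     vowels = ""
--     consonants = ""
--     for char in s:
--         if char.lower() in "aeiou":
--             vowels += char
--         else:
--             consonants += char
--     return vowels + consonants
-- ===== SOURCE B (Python) =====
-- def sort_vowels_consonants(s):
--     # Stable sort keyed on "is not a vowel": False (vowels) sorts before True,
--     # and stability keeps vowels and consonants each in original order.
--     return "".join(sorted(s, key=lambda c: c.lower() not in "aeiou"))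
-- ===== Notes on version B (the rewrite author's own statement) =====
-- stated objective: idiomatic
-- what changed: Replaces the two-accumulator partition loop with a single stable sort over the characters keyed on the non-vowel predicate, joined once.
import Mathlib
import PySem

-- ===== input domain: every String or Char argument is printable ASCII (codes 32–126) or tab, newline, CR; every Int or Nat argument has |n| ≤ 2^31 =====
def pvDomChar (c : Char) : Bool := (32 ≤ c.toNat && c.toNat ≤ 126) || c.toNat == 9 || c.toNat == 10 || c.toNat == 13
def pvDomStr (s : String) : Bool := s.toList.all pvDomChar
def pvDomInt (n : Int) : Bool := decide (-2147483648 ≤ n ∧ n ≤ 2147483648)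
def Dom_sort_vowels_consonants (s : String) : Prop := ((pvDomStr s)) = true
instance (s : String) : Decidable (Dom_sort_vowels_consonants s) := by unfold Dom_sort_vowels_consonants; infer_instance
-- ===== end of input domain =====

-- ===== PORT A =====
-- B changes A's two-accumulator partition loop into one stable keyed sort (idiomatic rewrite);
-- same return value, no side effects involved.

-- char.lower() in "aeiou"
def pvIsVowel (c : Char) : Bool := ['a','e','i','o','u'].contains (PySem.Chars.lowerChar c)

-- port of A: one pass, two string accumulators (kept as List Char, joined by String.mk)
def sort_vowels_consonants (s : String) : String :=
  let r := s.toList.foldl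
    (fun (acc : List Char × List Char) char =>
      if pvIsVowel char then (acc.1 ++ [char], acc.2) else (acc.1, acc.2 ++ [char]))
    ([], [])
  String.mk (r.1 ++ r.2)

-- ===== PORT B =====
-- key = (c.lower() not in "aeiou"): Python bool False/True ported as Nat 0/1 (Python sorts bools as ints)
def pvNotVowelKey (c : Char) : Nat := if pvIsVowel c then 0 else 1

-- port of B: ''.join(sorted(s, key=...))
def sort_vowels_consonants_alt (s : String) : String :=
  String.mk (PySem.List.sorted s.toList pvNotVowelKey)

-- ===== PRECONDITION & SPEC =====
def Spec_sort_vowels_consonants (s : String) (out : String) : Prop := out = sort_vowels_consonants_alt s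
instance (s : String) (out : String) : Decidable (Spec_sort_vowels_consonants s out) := by unfold Spec_sort_vowels_consonants; infer_instance

-- ===== CLAIM (what is proved, stated in full; the proofs are below) =====
def Claim_equal_sort_vowels_consonants : Prop := ∀ (s : String), Dom_sort_vowels_consonants s → Spec_sort_vowels_consonants s (sort_vowels_consonants s)

-- ===== LEMMAS AND PROOFS =====

-- A's loop is a pairwise filter
lemma partition_foldl (xs : List Char) (v c : List Char) :
    xs.foldl
      (fun (acc : List Char × List Char) char =>
        if pvIsVowel char then (acc.1 ++ [char], acc.2) else (acc.1, acc.2 ++ [char]))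
      (v, c)
    = (v ++ xs.filter (fun x => pvIsVowel x), c ++ xs.filter (fun x => !pvIsVowel x)) := by
  induction xs generalizing v c with
  | nil => simp
  | cons x xs ih =>
    by_cases h : pvIsVowel x <;> simp [h, ih]

-- insertBy walks past a prefix it does not insert before
lemma insertBy_append_not_before (before : Char → Char → Bool) (x : Char)
    (V C : List Char) (h : ∀ y ∈ V, before x y = false) :
    PySem.List.insertBy before x (V ++ C) = V ++ PySem.List.insertBy before x C := by
  induction V with
  | nil => simp
  | cons v V ih =>
    have hv : before x v = false := h v (by simp)
    simp [PySem.List.insertBy, hv, ih (fun y hy => h y (by simp [hy]))]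

-- a stable sort on a {0,1}-valued key is the stable partition
lemma sorted_binary_key (xs : List Char) :
    PySem.List.sorted xs pvNotVowelKey
      = xs.filter (fun x => pvIsVowel x) ++ xs.filter (fun x => !pvIsVowel x) := by
  rw [PySem.List.sorted_eq_foldl_insertBy]
  induction xs using List.reverseRecOn with
  | nil => simp
  | append_singleton xs x ih =>
    rw [List.foldl_append, List.foldl_cons, List.foldl_nil, ih]
    by_cases h : pvIsVowel x
    · have hV : ∀ y ∈ xs.filter (fun x => pvIsVowel x),
          (decide (pvNotVowelKey x < pvNotVowelKey y)) = false := by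
        intro y hy
        have hy' : pvIsVowel y := by simpa using (List.of_mem_filter hy)
        simp [pvNotVowelKey, h, hy']
      rw [insertBy_append_not_before _ _ _ _ hV]
      cases hc : xs.filter (fun x => !pvIsVowel x) with
      | nil => simp [hc, PySem.List.insertBy, h]
      | cons y ys =>
        have hy' : pvIsVowel y = false := by
          have := List.of_mem_filter (l := xs) (p := fun x => !pvIsVowel x)
            (a := y) (by simp [hc])
          simpa using this
        simp [PySem.List.insertBy, pvNotVowelKey, h, hy', List.filter_append, hc]
    · have hall : ∀ y ∈ xs.filter (fun x => pvIsVowel x) ++ xs.filter (fun x => !pvIsVowel x),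
          (decide (pvNotVowelKey x < pvNotVowelKey y)) = false := by
        intro y _
        by_cases hy : pvIsVowel y <;> simp [pvNotVowelKey, h, hy]
      rw [PySem.List.insertBy_of_forall_not_before _ _ _ hall]
      simp [List.filter_append, h]

-- ===== VERDICT (by name: the statement is the Claim_ definition above) =====
theorem sort_vowels_consonants_spec : Claim_equal_sort_vowels_consonants := by
  intro s _
  unfold Spec_sort_vowels_consonants sort_vowels_consonants sort_vowels_consonants_alt
  rw [sorted_binary_key, partition_foldl]
  simp
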